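-- pv_equiv track=rewrite | github.com/ynictrl/Learning-Python | Metodos_numericos/Lista_0/exerc_6.py | numero_triplas
-- ===== SOURCE A (Python) =====
-- def numero_triplas(numeros):
--     count = 0 # contagem
--     pred = 0 # antecessor
--     tripla = 0
--
--     for i in numeros:
--         if i != pred:
--             count = 0
--
--         pred = i
--         count += 1
--
--         if count >= 3:
--             tripla += 1
--
--     return (f'A seqüência dada contém {tripla} tripla(s).')
-- ===== SOURCE B (Python) =====
-- def numero_triplas(numeros):
--     tripla = sum(1 for a, b, c in zip(numeros, numeros[1:], numeros[2:]) if a == b == c)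
--     return (f'A seqüência dada contém {tripla} tripla(s).')
-- ===== Notes on version B (the rewrite author's own statement) =====
-- stated objective: idiomatic
-- what changed: Replaced the stateful reset-counter loop (count/pred/tripla) with a stateless sliding-window count: one comprehension over zip(numeros, numeros[1:], numeros[2:]) counting windows of three equal elements.
import Mathlib
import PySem

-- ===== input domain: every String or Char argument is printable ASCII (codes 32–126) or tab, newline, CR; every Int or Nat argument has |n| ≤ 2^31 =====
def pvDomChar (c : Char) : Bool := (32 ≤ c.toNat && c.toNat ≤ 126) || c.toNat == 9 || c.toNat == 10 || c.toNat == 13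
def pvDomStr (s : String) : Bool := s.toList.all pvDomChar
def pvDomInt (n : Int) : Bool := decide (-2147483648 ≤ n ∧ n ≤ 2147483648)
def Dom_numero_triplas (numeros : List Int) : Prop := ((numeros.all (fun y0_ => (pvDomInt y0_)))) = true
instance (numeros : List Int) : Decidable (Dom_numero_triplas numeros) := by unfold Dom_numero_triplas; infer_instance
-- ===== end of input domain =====

-- B replaces A's stateful reset-counter loop by a stateless count of equal sliding windows of width 3 (idiomatic decomposition, same cost).

-- ===== PORT A =====
def numero_triplas (numeros : List Int) : String :=
  let s := numeros.foldl (fun (st : Int × Int × Int) i =>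
    let count := st.1
    let pred := st.2.1
    let tripla := st.2.2
    let count := if i ≠ pred then 0 else count
    let pred := i
    let count := count + 1
    let tripla := if count ≥ 3 then tripla + 1 else tripla
    (count, pred, tripla)) (0, 0, 0)
  "A seqüência dada contém " ++ PySem.Int.toStr s.2.2 ++ " tripla(s)."

-- ===== PORT B =====
def numero_triplas_alt (numeros : List Int) : String :=
  -- zip(numeros, numeros[1:], numeros[2:]) as nested zips; tripla = number of equal windows
  let windows := List.zip numeros (List.zip (numeros.drop 1) (numeros.drop 2))
  let tripla : Int :=
    ((windows.filter (fun w => decide (w.1 = w.2.1 ∧ w.2.1 = w.2.2))).length : Nat)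
  "A seqüência dada contém " ++ PySem.Int.toStr tripla ++ " tripla(s)."

-- ===== PRECONDITION & SPEC =====
def Spec_numero_triplas (numeros : List Int) (out : String) : Prop := out = numero_triplas_alt numeros
instance (numeros : List Int) (out : String) : Decidable (Spec_numero_triplas numeros out) := by unfold Spec_numero_triplas; infer_instance

-- ===== CLAIM (what is proved, stated in full; the proofs are below) =====
def Claim_equal_numero_triplas : Prop := ∀ (numeros : List Int), Dom_numero_triplas numeros → Spec_numero_triplas numeros (numero_triplas numeros)

-- ===== LEMMAS AND PROOFS =====

-- A's loop body as a function
def pvAStep (st : Int × Int × Int) (i : Int) : Int × Int × Int :=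
  let count := st.1
  let pred := st.2.1
  let tripla := st.2.2
  let count := if i ≠ pred then 0 else count
  let pred := i
  let count := count + 1
  let tripla := if count ≥ 3 then tripla + 1 else tripla
  (count, pred, tripla)

-- the tripla increments A's loop produces from state (count, pred) on the rest of the list
def pvG (count pred : Int) : List Int → Int
  | [] => 0
  | i :: t =>
    let c := if i ≠ pred then 1 else count + 1
    (if c ≥ 3 then 1 else 0) + pvG c i t

-- abstraction of (count, pred): b = "the previous two elements were equal" (count ≥ 2)
def pvW (b : Bool) (p : Int) : List Int → Int
  | [] => 0
  | a :: t => (if a = p ∧ b = true then 1 else 0) + pvW (decide (a = p)) a t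

-- B's window count as an Int
def pvZ (numeros : List Int) : Int :=
  (((List.zip numeros (List.zip (numeros.drop 1) (numeros.drop 2))).filter
      (fun w => decide (w.1 = w.2.1 ∧ w.2.1 = w.2.2))).length : Nat)

theorem pvFoldl_tripla (xs : List Int) : ∀ st : Int × Int × Int,
    (xs.foldl pvAStep st).2.2 = st.2.2 + pvG st.1 st.2.1 xs := by
  induction xs with
  | nil => intro st; simp [pvG]
  | cons a xs ih =>
    intro st
    rw [List.foldl_cons, ih]
    simp only [pvAStep, pvG]
    by_cases h : a = st.2.1
    · simp only [h, ne_eq, not_true_eq_false, if_false]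
      split_ifs <;> ring
    · simp only [ne_eq, h, not_false_eq_true, if_true]
      have h3 : ¬ ((0 : Int) + 1 ≥ 3) := by norm_num
      have h1 : ¬ ((1 : Int) ≥ 3) := by norm_num
      simp [h1]
      try ring

theorem pvG_eq_pvW (xs : List Int) : ∀ (c : Int) (p : Int), 1 ≤ c →
    pvG c p xs = pvW (decide (2 ≤ c)) p xs := by
  induction xs with
  | nil => intro c p _; simp [pvG, pvW]
  | cons a xs ih =>
    intro c p hc
    by_cases h : a = p
    · subst h
      simp only [pvG, pvW, ne_eq, not_true_eq_false, if_false]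
      rw [ih (c + 1) a (by omega)]
      have h3 : (c + 1 ≥ 3) ↔ (2 ≤ c) := by omega
      have h2 : (2 : Int) ≤ c + 1 := by omega
      by_cases hcc : 2 ≤ c <;> simp [h3, h2, hcc]
    · simp only [pvG, pvW, ne_eq, h, not_false_eq_true, if_true]
      rw [ih 1 a (by norm_num)]
      have h1 : ¬ ((1 : Int) ≥ 3) := by norm_num
      have h2 : ¬ ((2 : Int) ≤ 1) := by norm_num
      simp [h1, h2]

theorem pvW_eq_zcount (t : List Int) : ∀ p q : Int,
    pvW (decide (q = p)) q t =
      (((List.zip (p :: q :: t) (List.zip (q :: t) t)).filter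
          (fun w => decide (w.1 = w.2.1 ∧ w.2.1 = w.2.2))).length : Nat) := by
  induction t with
  | nil => intro p q; simp [pvW]
  | cons a t ih =>
    intro p q
    simp only [pvW, List.zip_cons_cons, List.filter_cons]
    rw [ih q a]
    by_cases h1 : p = q <;> by_cases h2 : a = q <;>
      simp [h1, h2, eq_comm, and_comm] <;> push_cast <;> try ring

theorem pvTripla_eq (xs : List Int) :
    (xs.foldl pvAStep (0, 0, 0)).2.2 = pvZ xs := by
  match xs with
  | [] => simp [pvZ]
  | [a] =>
    simp only [pvZ, List.drop, List.zip_nil_right]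
    simp [pvAStep]
  | a :: b :: t =>
    rw [pvFoldl_tripla]
    have hstep : pvG 0 0 (a :: b :: t) = pvG 1 a (b :: t) := by
      by_cases h : a = 0 <;> simp [pvG, h]
    rw [hstep, pvG_eq_pvW (b :: t) 1 a (by norm_num)]
    have hd : (decide ((2:Int) ≤ 1)) = false := by decide
    rw [hd]
    simp only [pvW]
    have hz : (if b = a ∧ (false : Bool) = true then (1:Int) else 0) = 0 := by simp
    rw [hz]
    rw [pvW_eq_zcount t a b]
    simp [pvZ]

-- ===== VERDICT (by name: the statement is the Claim_ definition above) =====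
theorem numero_triplas_spec : Claim_equal_numero_triplas := by
  intro numeros _
  show _ = _
  unfold numero_triplas numero_triplas_alt
  simp only []
  have := pvTripla_eq numeros
  -- the foldl in numero_triplas is literally a foldl of pvAStep
  have hfold : numeros.foldl (fun (st : Int × Int × Int) i =>
      let count := st.1
      let pred := st.2.1
      let tripla := st.2.2
      let count := if i ≠ pred then 0 else count
      let pred := i
      let count := count + 1
      let tripla := if count ≥ 3 then tripla + 1 else tripla
      (count, pred, tripla)) (0, 0, 0) = numeros.foldl pvAStep (0, 0, 0) := rfl
  rw [hfold, this]
  rfl
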